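-- pv_equiv track=rewrite | github.com/venom1270/AdventOfCode-2023 | 11/main.py | expand_galaxy_map
-- ===== SOURCE A (Python) =====
-- def expand_galaxy_map(gmap):
--     expanded_map = []
--     # By row
--     for row in gmap:
--         if all(x == "." for x in row):
--             expanded_map.append(["." for _ in row])
--         expanded_map.append([x for x in row])
--     # By columns
--     offset = 0
--     for col in range(len(gmap[0])):
--         if is_expandable_column(gmap, col):
--             for row in expanded_map:
--                 row.insert(col + offset, ".")
--             offset += 1
--     return expanded_map
--
-- def is_expandable_column(gmap, i):
--     for row in gmap:
--         if row[i] != ".":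
--             return False
--
--     return True
-- ===== SOURCE B (Python) =====
-- def expand_galaxy_map(gmap):
--     w = len(gmap[0])
--     expandable = [all(row[c] == "." for row in gmap) for c in range(w)]
--     expanded_map = []
--     for row in gmap:
--         new_row = []
--         for j, x in enumerate(row):
--             if j < w and expandable[j]:
--                 new_row.append(".")
--             new_row.append(x)
--         if all(x == "." for x in row):
--             expanded_map.append(list(new_row))
--         expanded_map.append(new_row)
--     return expanded_map
-- ===== Notes on version B (the rewrite author's own statement) =====
-- stated objective: alternative
-- what changed: Precompute which columns are expandable once, then build each output row in a single pass emitting the duplicate '.' inline, instead of repeatedly calling list.insert on every row for every expandable column.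
import Mathlib
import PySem

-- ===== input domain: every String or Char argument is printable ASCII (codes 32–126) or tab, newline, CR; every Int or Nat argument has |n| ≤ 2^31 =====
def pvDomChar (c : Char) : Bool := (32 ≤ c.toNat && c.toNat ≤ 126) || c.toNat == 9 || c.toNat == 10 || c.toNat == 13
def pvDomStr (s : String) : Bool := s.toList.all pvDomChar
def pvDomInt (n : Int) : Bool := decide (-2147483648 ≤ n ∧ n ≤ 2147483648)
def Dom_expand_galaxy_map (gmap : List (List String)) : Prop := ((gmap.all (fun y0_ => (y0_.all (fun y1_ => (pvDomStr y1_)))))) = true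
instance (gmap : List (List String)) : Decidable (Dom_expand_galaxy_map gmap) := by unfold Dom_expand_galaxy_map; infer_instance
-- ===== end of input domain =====

-- B precomputes the set of expandable columns once and builds every output row in a
-- single left-to-right pass, instead of A's repeated list.insert over all rows per column.

-- ===== PORT A =====
def is_expandable_column : List (List String) → Int → Bool
  | [], _ => true
  | row :: rest, i =>
      if PySem.List.pyGet? row i ≠ some "." then false
      else is_expandable_column rest i

def pyRowPhase : List (List String) → List (List String)
  | [] => []
  | row :: rest =>
      (if row.all (fun x => x == ".") then [row.map (fun _ => ".")] else [])
        ++ row.map (fun x => x) :: pyRowPhase rest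

def expand_galaxy_map (gmap : List (List String)) : List (List String) :=
  let em := pyRowPhase gmap
  let res := (PySem.List.pyRange 0 ((gmap.headD []).length : Int) 1).foldl
      (fun (st : List (List String) × Int) col =>
        if is_expandable_column gmap col then
          (st.1.map (fun row => PySem.List.insert row (col + st.2) "."), st.2 + 1)
        else st)
      (em, 0)
  res.1

-- ===== PORT B =====
def altRow (w : Nat) (exp : List Bool) (r : List String) : List String :=
  (PySem.List.enumerate r).foldl
    (fun acc jx =>
      (if decide (jx.1 < (w : Int)) && PySem.List.pyGetD exp jx.1 false
       then acc ++ ["."] else acc) ++ [jx.2])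
    []

def expand_galaxy_map_alt (gmap : List (List String)) : List (List String) :=
  let w := (gmap.headD []).length
  let exp := (PySem.List.pyRange 0 (w : Int) 1).map
      (fun c => gmap.all (fun row => (PySem.List.pyGet? row c).getD "?" == "."))
  gmap.foldl (fun acc row =>
    let new := altRow w exp row
    (if row.all (fun x => x == ".") then acc ++ [new] else acc) ++ [new]) []

-- ===== PRECONDITION & SPEC =====
-- Pre_ holds exactly where A returns: it excludes the empty map (gmap[0] raises IndexError)
-- and ragged maps on which the column scan reaches a row shorter than the current column
-- before an earlier row with a non-'.' entry there short-circuits it (IndexError).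
def Pre_expand_galaxy_map (gmap : List (List String)) : Prop :=
  gmap ≠ [] ∧ ∀ c < (gmap.headD []).length, ∀ i < gmap.length,
    gmap[i]!.length ≤ c → ∃ i' < i, c < (gmap[i']!).length ∧ ((gmap[i']!)[c]!) ≠ "."
instance (gmap : List (List String)) : Decidable (Pre_expand_galaxy_map gmap) := by
  unfold Pre_expand_galaxy_map; infer_instance

def pvWitness_expand_galaxy_map : List (List String) := [[".", "#"], [".", "."]]

def Spec_expand_galaxy_map (gmap : List (List String)) (out : List (List String)) : Prop := out = expand_galaxy_map_alt gmap
instance (gmap : List (List String)) (out : List (List String)) : Decidable (Spec_expand_galaxy_map gmap out) := by unfold Spec_expand_galaxy_map; infer_instance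

-- ===== CLAIM (what is proved, stated in full; the proofs are below) =====
def Claim_equal_expand_galaxy_map : Prop := ∀ (gmap : List (List String)), Dom_expand_galaxy_map gmap → Pre_expand_galaxy_map gmap → Spec_expand_galaxy_map gmap (expand_galaxy_map gmap)

-- ===== LEMMAS AND PROOFS =====

def pvE (gmap : List (List String)) (c : Nat) : Bool :=
  gmap.all (fun row => (PySem.List.pyGet? row (c : Int)).getD "?" == ".")

-- single-pass row transform: duplicate a '.' before every element whose absolute index k
-- satisfies k < c and e k; `j` is the absolute index of the head of `r`
def pvP (e : Nat → Bool) (c : Nat) : Nat → List String → List String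
  | _, [] => []
  | j, x :: r => (if j < c ∧ e j = true then [".", x] else [x]) ++ pvP e c (j+1) r

-- number of e-true indices in [j, c)
def pvCnt (e : Nat → Bool) (j c : Nat) : Nat := (List.range' j (c - j)).countP e

theorem pvCnt_of_le (e : Nat → Bool) {j c : Nat} (h : c ≤ j) : pvCnt e j c = 0 := by
  unfold pvCnt
  have hz : c - j = 0 := by omega
  simp [hz]

theorem pvCnt_step (e : Nat → Bool) {j c : Nat} (h : j < c) :
    pvCnt e j c = (if e j then 1 else 0) + pvCnt e (j+1) c := by
  unfold pvCnt
  have h1 : c - j = (c - (j+1)) + 1 := by omega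
  rw [h1, List.range'_succ, List.countP_cons]
  by_cases he : e j
  · simp [he]; omega
  · simp [he]

theorem pvCnt_top (e : Nat → Bool) {j c : Nat} (h : j ≤ c) :
    pvCnt e j (c+1) = pvCnt e j c + (if e c then 1 else 0) := by
  unfold pvCnt
  have h1 : c + 1 - j = (c - j) + 1 := by omega
  rw [h1, List.range'_concat, List.countP_append]
  have h2 : j + (c - j) = c := by omega
  by_cases he : e c <;> simp [he, h2]

theorem pvP_of_le (e : Nat → Bool) {c : Nat} :
    ∀ (r : List String) (j : Nat), c ≤ j → pvP e c j r = r := by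
  intro r
  induction r with
  | nil => intro j _; rfl
  | cons x r ih =>
      intro j hj
      simp only [pvP]
      rw [if_neg (by omega), ih (j+1) (by omega)]
      rfl

theorem pvP_succ_false (e : Nat → Bool) {c : Nat} (hc : e c = false) :
    ∀ (r : List String) (j : Nat), pvP e (c+1) j r = pvP e c j r := by
  intro r
  induction r with
  | nil => intro j; rfl
  | cons x r ih =>
      intro j
      simp only [pvP, ih]
      congr 1
      by_cases hej : e j = true
      · by_cases hj : j = c
        · subst hj; rw [hej] at hc; cases hc
        · have hiff : (j < c + 1) ↔ (j < c) := by omega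
          simp [hiff]
      · simp [hej]

theorem pvP_length (e : Nat → Bool) {c : Nat} :
    ∀ (r : List String) (j : Nat), c ≤ j + r.length →
      (pvP e c j r).length = r.length + pvCnt e j c := by
  intro r
  induction r with
  | nil =>
      intro j h
      simp only [List.length_nil, Nat.add_zero] at h
      simp [pvP, pvCnt_of_le e h]
  | cons x r ih =>
      intro j h
      simp only [List.length_cons] at h
      simp only [pvP, List.length_append, List.length_cons]
      rw [ih (j+1) (by omega)]
      by_cases h1 : j < c
      · rw [pvCnt_step e h1]
        by_cases h2 : e j <;> simp [h1, h2] <;> omega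
      · rw [pvCnt_of_le e (by omega), pvCnt_of_le e (by omega)]
        simp [h1]
        omega

theorem pv_insert_append (a t : List String) (p : Nat) (v : String) (hp : p ≤ t.length) :
    PySem.List.insert (a ++ t) ((a.length + p : Nat) : Int) v
      = a ++ PySem.List.insert t ((p : Nat) : Int) v := by
  rw [PySem.List.insert_natCast _ _ _ (by simp; omega),
      PySem.List.insert_natCast _ _ _ hp]
  rw [List.take_append, List.drop_append]
  simp [List.take_of_length_le, List.drop_of_length_le]

theorem pvP_ins (e : Nat → Bool) {c : Nat} (hc : e c = true) :
    ∀ (r : List String) (j : Nat), j ≤ c → c < j + r.length →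
      PySem.List.insert (pvP e c j r) (((c - j) + pvCnt e j c : Nat) : Int) "."
        = pvP e (c+1) j r := by
  intro r
  induction r with
  | nil => intro j h1 h2; simp at h2; omega
  | cons x r ih =>
      intro j h1 h2
      simp only [List.length_cons] at h2
      by_cases hj : j = c
      · subst hj
        have hz : ((j - j) + pvCnt e j j : Nat) = 0 := by
          rw [pvCnt_of_le e (Nat.le_refl j)]; omega
        rw [hz]
        simp only [pvP]
        rw [pvP_of_le e r (j+1) (by omega), pvP_of_le e r (j+1) (by omega)]
        rw [if_neg (by omega), if_pos ⟨by omega, hc⟩]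
        simp [PySem.List.insert_zero]
      · have hjc : j < c := by omega
        have hple : (c - (j+1)) + pvCnt e (j+1) c ≤ (pvP e c (j+1) r).length := by
          rw [pvP_length e r (j+1) (by omega)]; omega
        simp only [pvP]
        by_cases hej : e j = true
        · rw [if_pos ⟨hjc, hej⟩, if_pos ⟨by omega, hej⟩]
          have hpos : ((c - j) + pvCnt e j c : Nat)
              = (([".", x] : List String).length + ((c - (j+1)) + pvCnt e (j+1) c) : Nat) := by
            rw [pvCnt_step e hjc]; simp [hej]; omega
          rw [hpos, pv_insert_append _ _ _ _ hple, ih (j+1) (by omega) (by omega)]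
        · rw [if_neg (fun hh => hej hh.2), if_neg (fun hh => hej hh.2)]
          have hpos : ((c - j) + pvCnt e j c : Nat)
              = (([x] : List String).length + ((c - (j+1)) + pvCnt e (j+1) c) : Nat) := by
            rw [pvCnt_step e hjc]; simp [hej]; omega
          rw [hpos, pv_insert_append _ _ _ _ hple, ih (j+1) (by omega) (by omega)]

theorem isexp_eq (gmap : List (List String)) (i : Int) :
    is_expandable_column gmap i
      = gmap.all (fun row => (PySem.List.pyGet? row i).getD "?" == ".") := by
  induction gmap with
  | nil => rfl
  | cons row rest ih =>
      simp only [is_expandable_column, List.all_cons]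
      cases h : PySem.List.pyGet? row i with
      | none => simp
      | some x =>
          by_cases hx : x = "."
          · subst hx; simp [ih]
          · simp [hx]

theorem pyRowPhase_len {P : Nat → Prop} {gmap : List (List String)}
    (h : ∀ row ∈ gmap, P row.length) :
    ∀ r ∈ pyRowPhase gmap, P r.length := by
  induction gmap with
  | nil => intro r hr; cases hr
  | cons row rest ih =>
      intro r hr
      simp only [pyRowPhase, List.mem_append, List.mem_cons] at hr
      rcases hr with hr | hr | hr
      · rcases (by split at hr <;> simp_all : r = row.map (fun _ => ".")) with rfl
        simpa using h row (by simp)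
      · subst hr; simpa using h row (by simp)
      · exact ih (fun q hq => h q (by simp [hq])) r hr

theorem pyRowPhase_map (F : List String → List String) (gmap : List (List String)) :
    (pyRowPhase gmap).map F
      = gmap.flatMap (fun row =>
          (if row.all (fun x => x == ".") then [F (row.map (fun _ => "."))] else [])
            ++ [F (row.map (fun x => x))]) := by
  induction gmap with
  | nil => rfl
  | cons row rest ih =>
      simp only [pyRowPhase, List.map_append, List.map_cons, ih, List.flatMap_cons]
      by_cases hd : row.all (fun x => x == ".") = true
      · rw [if_pos hd, if_pos hd]
        simp
      · rw [if_neg hd, if_neg hd]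
        simp

theorem pv_fold_inv (gmap : List (List String)) (em : List (List String)) (W : Nat)
    (hrow : ∀ k, pvE gmap k = true → ∀ r ∈ em, k < r.length) :
    ∀ k, k ≤ W →
      ((List.range k).map (fun (n : Nat) => (n : Int))).foldl
        (fun (st : List (List String) × Int) col =>
          if is_expandable_column gmap col then
            (st.1.map (fun row => PySem.List.insert row (col + st.2) "."), st.2 + 1)
          else st) (em, 0)
      = (em.map (pvP (pvE gmap) k 0), ((pvCnt (pvE gmap) 0 k : Nat) : Int)) := by
  intro k
  induction k with
  | zero =>
      simp only [List.range_zero, List.map_nil, List.foldl_nil]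
      rw [pvCnt_of_le _ (Nat.le_refl 0)]
      have hm : em.map (pvP (pvE gmap) 0 0) = em := by
        rw [List.map_congr_left (fun r _ => pvP_of_le (pvE gmap) r 0 (Nat.le_refl 0)),
            List.map_id']
      rw [hm]
      simp
  | succ k ih =>
      intro hk
      rw [List.range_succ, List.map_append, List.foldl_append, ih (by omega)]
      simp only [List.map_cons, List.map_nil, List.foldl_cons, List.foldl_nil]
      have hisexp : is_expandable_column gmap ((k : Nat) : Int) = pvE gmap k :=
        isexp_eq gmap ((k : Nat) : Int)
      rw [hisexp]
      by_cases he : pvE gmap k = true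
      · rw [if_pos he]
        have hcnt : pvCnt (pvE gmap) 0 (k+1) = pvCnt (pvE gmap) 0 k + 1 := by
          rw [pvCnt_top _ (Nat.zero_le k), he]; simp
        refine Prod.ext ?_ ?_
        · simp only [List.map_map]
          refine List.map_congr_left (fun r hr => ?_)
          have hrlen : k < 0 + r.length := by
            have := hrow k he r hr; omega
          have := pvP_ins (pvE gmap) he r 0 (Nat.zero_le k) hrlen
          have hpos : (((k : Nat) : Int) + ((pvCnt (pvE gmap) 0 k : Nat) : Int))
              = (((k - 0) + pvCnt (pvE gmap) 0 k : Nat) : Int) := by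
            push_cast [Nat.sub_zero]; ring
          simp only [Function.comp]
          rw [hpos, this]
        · simp only [hcnt]; push_cast; ring
      · rw [if_neg he]
        have hef : pvE gmap k = false := by
          cases hb : pvE gmap k
          · rfl
          · exact absurd hb he
        have hcnt : pvCnt (pvE gmap) 0 (k+1) = pvCnt (pvE gmap) 0 k := by
          rw [pvCnt_top _ (Nat.zero_le k), hef]; simp
        rw [hcnt, List.map_congr_left
          (fun r _ => (pvP_succ_false (pvE gmap) hef r 0).symm)]

theorem pv_enum (gmap : List (List String)) (W : Nat) (exp : List Bool)
    (hexp : exp = (List.range W).map (fun n => pvE gmap n)) :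
    ∀ (r : List String) (j : Nat) (acc : List String),
      (PySem.List.enumerate r ((j : Nat) : Int)).foldl
        (fun acc jx =>
          (if decide (jx.1 < (W : Int)) && PySem.List.pyGetD exp jx.1 false
           then acc ++ ["."] else acc) ++ [jx.2]) acc
        = acc ++ pvP (pvE gmap) W j r := by
  intro r
  induction r with
  | nil => intro j acc; simp [PySem.List.enumerate_nil, pvP]
  | cons x r ihr =>
      intro j acc
      rw [PySem.List.enumerate_cons, List.foldl_cons]
      have hc : (decide (((j : Nat) : Int) < (W : Int))
            && PySem.List.pyGetD exp ((j : Nat) : Int) false)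
          = decide (j < W ∧ pvE gmap j = true) := by
        rw [PySem.List.pyGetD_natCast, hexp]
        by_cases h1 : j < W
        · rw [PySem.List.getD_map_range _ _ _ _ h1]
          by_cases h2 : pvE gmap j = true <;> simp [h1, h2]
        · rw [List.getD_eq_default]
          · simp [h1]
          · simp; omega
      rw [hc]
      have hcast : ((j : Nat) : Int) + 1 = (((j+1 : Nat)) : Int) := by push_cast; ring
      rw [hcast, ihr (j+1)]
      simp only [pvP]
      by_cases h2 : j < W ∧ pvE gmap j = true
      · simp [h2, List.append_assoc]
      · simp [h2, List.append_assoc]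

theorem allDot_map {row : List String} (h : row.all (fun x => x == ".") = true) :
    row.map (fun _ => ".") = row := by
  have hall := List.all_eq_true.mp h
  calc row.map (fun _ => ".")
      = row.map (fun a => a) :=
        List.map_congr_left (fun x hx => by
          have := hall x hx; simp at this; simp [this])
    _ = row := List.map_id' row

theorem B_eq (gmap : List (List String)) :
    expand_galaxy_map_alt gmap
      = gmap.flatMap (fun row =>
          (if row.all (fun x => x == ".")
           then [pvP (pvE gmap) (gmap.headD []).length 0 row] else [])
            ++ [pvP (pvE gmap) (gmap.headD []).length 0 row]) := by
  unfold expand_galaxy_map_alt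
  simp only []
  set W := (gmap.headD []).length with hW
  have hexp : ((PySem.List.pyRange 0 ((W : Nat) : Int) 1).map
      (fun c => gmap.all (fun row => (PySem.List.pyGet? row c).getD "?" == ".")))
      = (List.range W).map (fun n => pvE gmap n) := by
    rw [PySem.List.pyRange_one]
    simp [List.map_map, Function.comp, pvE]
  have haltrow : ∀ r : List String,
      altRow W ((PySem.List.pyRange 0 ((W : Nat) : Int) 1).map
        (fun c => gmap.all (fun row => (PySem.List.pyGet? row c).getD "?" == "."))) r
      = pvP (pvE gmap) W 0 r := by
    intro r
    unfold altRow
    have := pv_enum gmap W _ hexp r 0 []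
    simpa using this
  rw [PySem.List.foldl_congr_mem gmap _
    (fun acc row =>
      acc ++ ((if row.all (fun x => x == ".")
               then [pvP (pvE gmap) W 0 row] else [])
              ++ [pvP (pvE gmap) W 0 row])) []
    (by
      intro acc row _
      simp only [haltrow]
      by_cases hd : row.all (fun x => x == ".") = true
      · simp [hd, List.append_assoc]
      · simp [hd])]
  rw [PySem.List.foldl_append_eq_flatMap]
  simp

theorem pvE_row_len {gmap : List (List String)} {k : Nat} (h : pvE gmap k = true) :
    ∀ row ∈ gmap, k < row.length := by
  intro row hr
  have hx := List.all_eq_true.mp h row hr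
  rw [PySem.List.pyGet?_natCast] at hx
  cases hg : row[k]? with
  | none => rw [hg] at hx; simp at hx
  | some x => exact List.getElem?_eq_some_iff.mp hg |>.1

theorem A_eq (gmap : List (List String)) :
    expand_galaxy_map gmap
      = (pyRowPhase gmap).map (pvP (pvE gmap) (gmap.headD []).length 0) := by
  unfold expand_galaxy_map
  simp only []
  set W := (gmap.headD []).length with hW
  have hr : PySem.List.pyRange 0 ((W : Nat) : Int) 1
      = (List.range W).map (fun (n : Nat) => (n : Int)) := by
    rw [PySem.List.pyRange_one]
    simp
  rw [hr, pv_fold_inv gmap (pyRowPhase gmap) W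
    (fun k hk => pyRowPhase_len (P := fun n => k < n) (pvE_row_len hk)) W (Nat.le_refl W)]

theorem main_eq (gmap : List (List String)) :
    expand_galaxy_map gmap = expand_galaxy_map_alt gmap := by
  rw [A_eq gmap, B_eq gmap, pyRowPhase_map]
  refine List.flatMap_congr (fun row hrow => ?_)
  by_cases hd : row.all (fun x => x == ".") = true
  · simp only [hd, if_pos, allDot_map hd, List.map_id']
  · simp [hd, List.map_id']

-- ===== VERDICT (by name: the statement is the Claim_ definition above) =====
theorem expand_galaxy_map_spec : Claim_equal_expand_galaxy_map := by
  intro gmap _ _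
  unfold Spec_expand_galaxy_map
  exact main_eq gmap
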